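-- pv_equiv track=rewrite | github.com/GLA-Python/surprise-test-O2115500007AbhishekYadav | function_expanding.py | fun_exp
-- ===== SOURCE A (Python) =====
-- def fun_exp(lst):
--     data=[]
--     for i in range(0,len(lst)-1):
--         if lst[i]>lst[i+1]:
--             a=lst[i]-lst[i+1]
--         else:
--             a=lst[i+1]-lst[i]
--         data.append(a)
--
--     flag = 0
--     i = 0
--     while i < len(data)-1:
--         if(data[i] > data[i + 1]) or (data[i]==data[i+1]):
--             flag = 1
--         i += 1
--
--     return False if flag==1 else True
-- ===== SOURCE B (Python) =====
-- def fun_exp(lst):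
--     prev = None
--     for x, y in zip(lst, lst[1:]):
--         d = abs(x - y)
--         if prev is not None and d <= prev:
--             return False
--         prev = d
--     return True
-- ===== Notes on version B (the rewrite author's own statement) =====
-- stated objective: simpler
-- what changed: Single pass over consecutive pairs keeping only the previous absolute difference in a scalar with early exit, instead of building a difference list and then scanning it by index with a flag.
import Mathlib
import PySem

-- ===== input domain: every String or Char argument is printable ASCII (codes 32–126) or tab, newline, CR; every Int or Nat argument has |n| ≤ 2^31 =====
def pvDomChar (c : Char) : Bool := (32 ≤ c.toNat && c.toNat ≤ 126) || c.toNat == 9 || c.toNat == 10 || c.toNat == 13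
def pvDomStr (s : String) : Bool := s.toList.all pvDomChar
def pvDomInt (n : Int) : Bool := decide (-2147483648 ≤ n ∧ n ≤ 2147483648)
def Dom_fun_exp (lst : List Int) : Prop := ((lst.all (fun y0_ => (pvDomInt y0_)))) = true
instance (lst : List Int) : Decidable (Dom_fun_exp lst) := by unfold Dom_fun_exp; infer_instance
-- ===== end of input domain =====

-- B makes one pass over consecutive pairs keeping only the previous absolute difference
-- in a scalar (early exit), instead of A's difference list plus an index/flag scan: simpler.

-- ===== PORT A =====
-- the first loop of A: build `data`, the list of absolute consecutive differences
def funExpData (lst : List Int) : List Int :=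
  (PySem.List.pyRange 0 ((lst.length : Int) - 1) 1).foldl
    (fun data i =>
      let a : Int :=
        if PySem.List.pyGetD lst i 0 > PySem.List.pyGetD lst (i + 1) 0 then
          PySem.List.pyGetD lst i 0 - PySem.List.pyGetD lst (i + 1) 0
        else
          PySem.List.pyGetD lst (i + 1) 0 - PySem.List.pyGetD lst i 0
      data ++ [a]) []

-- the second loop of A: the while over `data` setting `flag`
def funExpFlag (data : List Int) : Int :=
  (PySem.List.pyRange 0 ((data.length : Int) - 1) 1).foldl
    (fun flag i =>
      if PySem.List.pyGetD data i 0 > PySem.List.pyGetD data (i + 1) 0 ∨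
         PySem.List.pyGetD data i 0 = PySem.List.pyGetD data (i + 1) 0 then
        1
      else flag) 0

def fun_exp (lst : List Int) : Bool :=
  if funExpFlag (funExpData lst) = 1 then false else true

-- ===== PORT B =====
def funExpGo : Option Int → List Int → Bool
  | _, [] => true
  | _, [_] => true
  | prev, x :: y :: rest =>
    let d : Int := |x - y|
    match prev with
    | some p => if d ≤ p then false else funExpGo (some d) (y :: rest)
    | none => funExpGo (some d) (y :: rest)

def fun_exp_alt (lst : List Int) : Bool := funExpGo none lst

-- ===== PRECONDITION & SPEC =====
def Spec_fun_exp (lst : List Int) (out : Bool) : Prop := out = fun_exp_alt lst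
instance (lst : List Int) (out : Bool) : Decidable (Spec_fun_exp lst out) := by unfold Spec_fun_exp; infer_instance

-- ===== CLAIM (what is proved, stated in full; the proofs are below) =====
def Claim_equal_fun_exp : Prop := ∀ (lst : List Int), Dom_fun_exp lst → Spec_fun_exp lst (fun_exp lst)

-- ===== LEMMAS AND PROOFS =====

/-- The list of absolute differences of consecutive elements, structurally. -/
def pvDiffs : List Int → List Int
  | x :: y :: r => |x - y| :: pvDiffs (y :: r)
  | _ => []

/-- Adjacent pairs strictly increase, structurally. -/
def pvChainLt : List Int → Bool
  | a :: b :: r => (a < b) && pvChainLt (b :: r)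
  | _ => true

/-- A's difference at Nat index k, in `List.getD` form. -/
def pvGN (lst : List Int) (k : Nat) : Int :=
  if lst.getD k 0 > lst.getD (k + 1) 0 then lst.getD k 0 - lst.getD (k + 1) 0
  else lst.getD (k + 1) 0 - lst.getD k 0

/-- A's violation test at Nat index k, in `List.getD` form. -/
def pvViol (l : List Int) (k : Nat) : Bool :=
  decide (l.getD k 0 > l.getD (k + 1) 0 ∨ l.getD k 0 = l.getD (k + 1) 0)

lemma pv_cast1 (xs : List Int) (k : Nat) (d : Int) :
    PySem.List.pyGetD xs ((k : Int) + 1) d = xs.getD (k + 1) d := by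
  have h : ((k : Int) + 1) = ((k + 1 : Nat) : Int) := by push_cast; ring
  rw [h, PySem.List.pyGetD_natCast]

lemma pvGN_abs (lst : List Int) (k : Nat) :
    pvGN lst k = |lst.getD k 0 - lst.getD (k + 1) 0| := by
  unfold pvGN
  split_ifs with h
  · rw [abs_of_pos] ; omega
  · rw [abs_of_nonpos] <;> omega

lemma pvGN_succ (x : Int) (xs : List Int) (k : Nat) :
    pvGN (x :: xs) (k + 1) = pvGN xs k := by
  simp [pvGN]

lemma pvViol_succ (x : Int) (xs : List Int) (k : Nat) :
    pvViol (x :: xs) (k + 1) = pvViol xs k := by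
  simp [pvViol]

lemma pv_map_range_diffs (lst : List Int) :
    (List.range (lst.length - 1)).map (pvGN lst) = pvDiffs lst := by
  induction lst with
  | nil => simp [pvDiffs]
  | cons x t ih =>
    cases t with
    | nil => simp [pvDiffs]
    | cons y r =>
      have hlen : (x :: y :: r : List Int).length - 1 = r.length + 1 := by simp
      rw [hlen, List.range_succ_eq_map, List.map_cons, List.map_map]
      have h0 : pvGN (x :: y :: r) 0 = |x - y| := by
        simp [pvGN_abs]
      have hcomp : (pvGN (x :: y :: r)) ∘ Nat.succ = pvGN (y :: r) := by
        funext k; simpa using pvGN_succ x (y :: r) k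
      rw [h0, hcomp, pvDiffs]
      have hlen' : (y :: r : List Int).length - 1 = r.length := by simp
      rw [← hlen', ih]

/-- The flag loop: the flag ends 1 iff some index satisfies the condition. -/
lemma pv_flag_fold {α : Type} (l : List α) (c : α → Prop) [DecidablePred c] (flag : Int) :
    l.foldl (fun f i => if c i then (1 : Int) else f) flag
      = if l.any (fun i => decide (c i)) then 1 else flag := by
  induction l generalizing flag with
  | nil => simp
  | cons a t ih =>
    simp only [List.foldl_cons, List.any_cons, ih]
    by_cases ha : c a <;> by_cases ht : t.any (fun i => decide (c i)) <;> simp [ha, ht]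

/-- The scan of `data` for a non-increase, expressed through `pvChainLt`. -/
lemma pv_chain_any (data : List Int) :
    pvChainLt data = !((List.range (data.length - 1)).any (pvViol data)) := by
  induction data with
  | nil => simp [pvChainLt]
  | cons a t ih =>
    cases t with
    | nil => simp [pvChainLt]
    | cons b r =>
      have hlen : (a :: b :: r : List Int).length - 1 = r.length + 1 := by simp
      rw [hlen, List.range_succ_eq_map, List.any_cons, List.any_map]
      have hcomp : (pvViol (a :: b :: r)) ∘ Nat.succ = pvViol (b :: r) := by
        funext k; simpa using pvViol_succ a (b :: r) k
      have hlen' : (b :: r : List Int).length - 1 = r.length := by simp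
      rw [hcomp, ← hlen']
      have h0 : pvViol (a :: b :: r) 0 = decide (a > b ∨ a = b) := by
        simp [pvViol]
      rw [pvChainLt, ih, h0]
      by_cases hab : a < b
      · have hno : ¬ (a > b ∨ a = b) := by omega
        simp [hab, hno]
      · have hyes : (a > b ∨ a = b) := by omega
        simp [hab, hyes]

/-- A's first loop builds exactly the structural difference list. -/
lemma pv_data_eq (lst : List Int) : funExpData lst = pvDiffs lst := by
  unfold funExpData
  have hr : PySem.List.pyRange 0 ((lst.length : Int) - 1) 1
      = (List.range (lst.length - 1)).map (fun k : Nat => (k : Int)) := by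
    rw [PySem.List.pyRange_one]
    have h : (((lst.length : Int) - 1) - 0).toNat = lst.length - 1 := by omega
    rw [h]
    apply List.map_congr_left; intro k _; omega
  rw [hr, List.foldl_map, PySem.List.foldl_append_singleton_eq_map, List.nil_append]
  rw [← pv_map_range_diffs lst]
  apply List.map_congr_left; intro k _
  simp [pvGN, PySem.List.pyGetD_natCast, pv_cast1]

/-- A's second loop plus the final test computes `pvChainLt` of `data`. -/
lemma pv_flag_eq (data : List Int) :
    (if funExpFlag data = 1 then false else true) = pvChainLt data := by
  unfold funExpFlag
  have hr : PySem.List.pyRange 0 ((data.length : Int) - 1) 1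
      = (List.range (data.length - 1)).map (fun k : Nat => (k : Int)) := by
    rw [PySem.List.pyRange_one]
    have h : (((data.length : Int) - 1) - 0).toNat = data.length - 1 := by omega
    rw [h]
    apply List.map_congr_left; intro k _; omega
  rw [hr, List.foldl_map]
  rw [pv_flag_fold (List.range (data.length - 1)) (fun k : Nat =>
        PySem.List.pyGetD data ((k : Nat) : Int) 0 > PySem.List.pyGetD data (((k : Nat) : Int) + 1) 0 ∨
        PySem.List.pyGetD data ((k : Nat) : Int) 0 = PySem.List.pyGetD data (((k : Nat) : Int) + 1) 0) 0]
  have hany : ((List.range (data.length - 1)).any (fun k : Nat =>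
      decide (PySem.List.pyGetD data ((k : Nat) : Int) 0 > PySem.List.pyGetD data (((k : Nat) : Int) + 1) 0 ∨
              PySem.List.pyGetD data ((k : Nat) : Int) 0 = PySem.List.pyGetD data (((k : Nat) : Int) + 1) 0)))
      = (List.range (data.length - 1)).any (pvViol data) := by
    have hfun : (fun k : Nat =>
        decide (PySem.List.pyGetD data ((k : Nat) : Int) 0 > PySem.List.pyGetD data (((k : Nat) : Int) + 1) 0 ∨
                PySem.List.pyGetD data ((k : Nat) : Int) 0 = PySem.List.pyGetD data (((k : Nat) : Int) + 1) 0))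
        = pvViol data := by
      funext k; simp [pvViol, PySem.List.pyGetD_natCast, pv_cast1]
    rw [hfun]
  rw [hany, pv_chain_any data]
  by_cases h : (List.range (data.length - 1)).any (pvViol data) <;> simp [h]

/-- B's loop, generalized over the carried previous difference. -/
lemma pv_B_go : ∀ (l : List Int) (prev : Option Int),
    funExpGo prev l = match prev with
      | none => pvChainLt (pvDiffs l)
      | some p => pvChainLt (p :: pvDiffs l) := by
  intro l
  induction l with
  | nil => intro prev; cases prev <;> simp [funExpGo, pvDiffs, pvChainLt]
  | cons x t ih =>
    intro prev
    cases t with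
    | nil => cases prev <;> simp [funExpGo, pvDiffs, pvChainLt]
    | cons y r =>
      cases prev with
      | none =>
        simp only [funExpGo, ih (some |x - y|), pvDiffs]
      | some p =>
        simp only [funExpGo, ih (some |x - y|), pvDiffs, pvChainLt]
        by_cases h : |x - y| ≤ p
        · have hlt : ¬ p < |x - y| := by omega
          simp [h, hlt]
        · have hlt : p < |x - y| := by omega
          simp [h, hlt]

-- ===== VERDICT (by name: the statement is the Claim_ definition above) =====
theorem fun_exp_spec : Claim_equal_fun_exp := by
  intro lst _
  unfold Spec_fun_exp fun_exp fun_exp_alt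
  rw [pv_data_eq, pv_flag_eq, pv_B_go]
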